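-- pv_equiv track=rewrite | github.com/chaba17/MyAccountant | utils.py | _build_prefix_parents
-- ===== SOURCE A (Python) =====
-- def _is_prefix_parent(a: str, b: str) -> bool:
--     """True if a is a TYPE A or TYPE B parent of b."""
--     if a == b:
--         return False
--     if b.startswith(a + ' '):          # TYPE A: space separator
--         return True
--     if ' ' not in a and len(a) < len(b) and b[:len(a)] == a:  # TYPE B: numeric
--         return True
--     return False
--
-- def _build_prefix_parents(all_codes):
--     """Set of all codes that have at least one prefix-child."""
--     parents = set()
--     for a in all_codes:
--         for b in all_codes:
--             if _is_prefix_parent(a, b):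
--                 parents.add(a)
--                 break
--     return parents
-- ===== SOURCE B (Python) =====
-- def _build_prefix_parents(all_codes):
--     """Set of all codes that have at least one prefix-child.
--
--     Instead of comparing all pairs, enumerate each code's proper prefixes once:
--     a prefix p of b is a parent of b iff the next char is a space (TYPE A) or
--     p itself contains no space (TYPE B). Collect those prefixes in a hash set
--     and intersect with the codes.
--     """
--     candidates = set()
--     for b in all_codes:
--         pref = ''
--         seen_space = False
--         for ch in b:
--             if ch == ' ' or not seen_space:
--                 candidates.add(pref)
--             pref += ch
--             if ch == ' ':
--                 seen_space = True
--     return {a for a in all_codes if a in candidates}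
-- ===== Notes on version B (the rewrite author's own statement) =====
-- stated objective: faster
-- what changed: Instead of testing all code pairs with _is_prefix_parent, B enumerates each code's qualifying proper prefixes once (next char is a space, or the prefix is space-free) into a hash set and intersects that set with the codes.
import Mathlib
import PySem

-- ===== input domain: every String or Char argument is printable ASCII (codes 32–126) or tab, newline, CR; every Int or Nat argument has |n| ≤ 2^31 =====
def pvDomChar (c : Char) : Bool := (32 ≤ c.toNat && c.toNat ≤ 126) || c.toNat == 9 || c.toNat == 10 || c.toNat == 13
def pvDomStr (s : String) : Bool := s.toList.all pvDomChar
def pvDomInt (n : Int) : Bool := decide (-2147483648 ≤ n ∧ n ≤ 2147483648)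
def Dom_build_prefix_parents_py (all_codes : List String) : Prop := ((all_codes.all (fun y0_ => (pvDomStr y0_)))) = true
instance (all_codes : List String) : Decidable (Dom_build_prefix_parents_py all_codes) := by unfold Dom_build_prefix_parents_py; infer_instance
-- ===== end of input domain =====

-- B replaces A's all-pairs scan by enumerating each code's qualifying proper prefixes
-- once into a hash set and intersecting it with the codes (objective: faster).

-- ===== PORT A =====
-- _is_prefix_parent(a, b)
def pvIsPrefixParent (a b : String) : Bool :=
  if a == b then false
  else if PySem.Str.startswith b (a ++ " ") then true
  else if !(PySem.Str.isIn " " a) && decide (PySem.Str.len a < PySem.Str.len b)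
          && (PySem.Str.slice b none (some (PySem.Str.len a)) == a) then true
  else false

def build_prefix_parents_py (all_codes : List String) : List String :=
  all_codes.foldl
    (fun parents a =>
      -- inner 'for b … if …: parents.add(a); break' = add a iff some b matches
      if all_codes.any (fun b => pvIsPrefixParent a b) then PySem.Set.add parents a
      else parents)
    PySem.Set.empty

-- ===== PORT B =====
-- inner loop 'for ch in b: …' of Source B, carrying (pref, seen_space, candidates)
def pvAddPrefixes : List Char → List Char → Bool → PySem.Set (List Char) → PySem.Set (List Char)
  | [], _, _, cands => cands
  | ch :: rest, pref, seenSpace, cands =>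
      let cands' := if ch == ' ' || !seenSpace then PySem.Set.add cands pref else cands
      pvAddPrefixes rest (pref ++ [ch]) (seenSpace || ch == ' ') cands'

def build_prefix_parents_py_alt (all_codes : List String) : List String :=
  let cands := all_codes.foldl (fun cs b => pvAddPrefixes b.toList [] false cs) PySem.Set.empty
  all_codes.foldl
    (fun out a => if PySem.Set.contains cands a.toList then PySem.Set.add out a else out)
    PySem.Set.empty

-- ===== PRECONDITION & SPEC =====
def Spec_build_prefix_parents_py (all_codes : List String) (out : List String) : Prop := out = build_prefix_parents_py_alt all_codes
instance (all_codes : List String) (out : List String) : Decidable (Spec_build_prefix_parents_py all_codes out) := by unfold Spec_build_prefix_parents_py; infer_instance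

-- ===== CLAIM (what is proved, stated in full; the proofs are below) =====
def Claim_equal_build_prefix_parents_py : Prop := ∀ (all_codes : List String), Dom_build_prefix_parents_py all_codes → Spec_build_prefix_parents_py all_codes (build_prefix_parents_py all_codes)

-- ===== LEMMAS AND PROOFS =====

-- 'al is a qualifying proper prefix of bl': what B's inner loop generates from bl
def pvGenBy (al bl : List Char) : Prop :=
  ∃ k, k < bl.length ∧ al = bl.take k ∧ (bl.getD k ' ' = ' ' ∨ ' ' ∉ bl.take k)

-- the common characterisation both conditions are reduced to
def pvParentOf (al bl : List Char) : Prop :=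
  (al ++ [' '] <+: bl) ∨ (' ' ∉ al ∧ al.length < bl.length ∧ al <+: bl)

lemma pvTake_add_one {l : List Char} {k : Nat} (h : k < l.length) :
    l.take (k+1) = l.take k ++ [l.getD k ' '] := by
  rw [List.take_add_one, List.getElem?_eq_getElem h, List.getD_eq_getElem l ' ' h]
  rfl

lemma pvGenBy_iff (al bl : List Char) : pvGenBy al bl ↔ pvParentOf al bl := by
  constructor
  · rintro ⟨k, hk, rfl, hcond⟩
    rcases hcond with hsp | hnsp
    · left
      have h1 : bl.take (k+1) = bl.take k ++ [' '] := by rw [pvTake_add_one hk, hsp]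
      rw [← h1]
      exact List.take_prefix _ _
    · right
      refine ⟨hnsp, ?_, List.take_prefix _ _⟩
      simp [Nat.min_eq_left (Nat.le_of_lt hk), hk]
  · rintro (hpre | ⟨hnsp, hlen, hpre⟩)
    · have hal : al <+: bl := List.IsPrefix.trans (List.prefix_append al [' ']) hpre
      have hlen : al.length + 1 ≤ bl.length := by
        have := List.IsPrefix.length_le hpre; simpa using this
      have h3 : bl.take al.length = al := by
        rw [List.prefix_iff_eq_take] at hal; exact hal.symm
      refine ⟨al.length, by omega, h3.symm, Or.inl ?_⟩
      have h1 : bl.take (al.length + 1) = al ++ [' '] := by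
        rw [List.prefix_iff_eq_take] at hpre
        simpa using hpre.symm
      have h2 : bl.take (al.length + 1) = bl.take al.length ++ [bl.getD al.length ' '] :=
        pvTake_add_one (by omega)
      rw [h1, h3] at h2
      have := List.append_cancel_left h2
      simpa using this.symm
    · rw [List.prefix_iff_eq_take] at hpre
      exact ⟨al.length, hlen, hpre, Or.inr (hpre ▸ hnsp)⟩

-- A's helper decides exactly pvParentOf
lemma pvIsPrefixParent_iff (a b : String) :
    pvIsPrefixParent a b = true ↔ pvParentOf a.toList b.toList := by
  have hsp : (" ").toList = [' '] := by decide
  have hsw_iff : PySem.Str.startswith b (a ++ " ") = true ↔ a.toList ++ [' '] <+: b.toList := by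
    rw [PySem.Str.startswith_eq, PySem.Chars.startswith_iff, String.toList_append, hsp]
  have hsp_mem : PySem.Str.isIn " " a = true ↔ ' ' ∈ a.toList := by
    rw [PySem.Str.isIn_iff_infix, hsp, List.singleton_infix_iff]
  have hslice : (PySem.Str.slice b none (some (PySem.Str.len a)) == a) = true ↔
      a.toList = b.toList.take a.toList.length := by
    rw [beq_iff_eq, ← String.toList_inj]
    have : (PySem.Str.slice b none (some (PySem.Str.len a))).toList =
        b.toList.take a.toList.length := by
      simp [PySem.Str.slice, PySem.List.slice_to, PySem.Str.len_eq]
    rw [this, eq_comm]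
  have hlen_iff : decide (PySem.Str.len a < PySem.Str.len b) = true ↔
      a.toList.length < b.toList.length := by
    rw [decide_eq_true_eq, PySem.Str.len_eq, PySem.Str.len_eq]
    exact_mod_cast Iff.rfl
  unfold pvIsPrefixParent pvParentOf
  split_ifs with heq hsw hc
  · -- a = b : both sides false
    have hab : a = b := by simpa using heq
    subst hab
    simp only [false_iff]
    rintro (hpre | ⟨_, hlen, _⟩)
    · have := List.IsPrefix.length_le hpre; simp at this
    · omega
  · simp only [true_iff]
    exact Or.inl (hsw_iff.mp hsw)
  · simp only [true_iff]
    simp only [Bool.and_eq_true, Bool.not_eq_true'] at hc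
    obtain ⟨⟨hnin, hlen⟩, hsl⟩ := hc
    right
    refine ⟨fun hm => by rw [hsp_mem.mpr hm] at hnin; simp at hnin,
      hlen_iff.mp hlen, ?_⟩
    rw [List.prefix_iff_eq_take]
    exact hslice.mp hsl
  · simp only [false_iff]
    rintro (hpre | ⟨hnin, hlen, hpre⟩)
    · exact hsw (hsw_iff.mpr hpre)
    · apply hc
      simp only [Bool.and_eq_true, Bool.not_eq_true']
      refine ⟨⟨?_, hlen_iff.mpr hlen⟩, ?_⟩
      · rw [Bool.eq_false_iff]; intro h; exact hnin (hsp_mem.mp h)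
      · rw [hslice, List.prefix_iff_eq_take] at *
        exact hpre

-- membership after B's inner loop, with the seen_space invariant
lemma mem_pvAddPrefixes (l : List Char) :
    ∀ (pref : List Char) (seen : Bool) (cands : PySem.Set (List Char)) (x : List Char),
    seen = decide (' ' ∈ pref) →
    (x ∈ pvAddPrefixes l pref seen cands ↔
      x ∈ cands ∨ ∃ k, k < l.length ∧ x = pref ++ l.take k ∧
        (l.getD k ' ' = ' ' ∨ ' ' ∉ pref ++ l.take k)) := by
  induction l with
  | nil => intro pref seen cands x _; simp [pvAddPrefixes]
  | cons ch rest ih =>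
    intro pref seen cands x hseen
    have hseen' : (seen || ch == ' ') = decide (' ' ∈ pref ++ [ch]) := by
      subst hseen
      by_cases h2 : ch = ' '
      · simp [h2, List.mem_append]
      · have h3 : ¬ (' ' = ch) := fun h => h2 h.symm
        simp [h2, h3, List.mem_append]
    rw [pvAddPrefixes, ih (pref ++ [ch]) _ _ x hseen']
    have hc : x ∈ (if ch == ' ' || !seen then PySem.Set.add cands pref else cands) ↔
        x ∈ cands ∨ (x = pref ∧ (ch = ' ' ∨ ' ' ∉ pref)) := by
      subst hseen
      by_cases h2 : ch = ' ' <;> by_cases h : ' ' ∈ pref <;>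
        simp [h, h2, PySem.Set.mem_add]
    rw [hc]
    constructor
    · rintro ((hx | ⟨rfl, hcond⟩) | ⟨k, hk, rfl, hcond⟩)
      · exact Or.inl hx
      · exact Or.inr ⟨0, by simp, by simp, by simpa using hcond⟩
      · refine Or.inr ⟨k + 1, by simpa using hk, by simp, ?_⟩
        simpa using hcond
    · rintro (hx | ⟨k, hk, rfl, hcond⟩)
      · exact Or.inl (Or.inl hx)
      · cases k with
        | zero =>
          refine Or.inl (Or.inr ⟨by simp, ?_⟩)
          simpa using hcond
        | succ j =>
          refine Or.inr ⟨j, by simpa using hk, by simp, ?_⟩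
          simpa using hcond

-- membership in the candidate set built by B's outer loop
lemma mem_candidates (codes : List String) :
    ∀ (cs : PySem.Set (List Char)) (x : List Char),
    (x ∈ codes.foldl (fun cs b => pvAddPrefixes b.toList [] false cs) cs ↔
      x ∈ cs ∨ ∃ b ∈ codes, pvGenBy x b.toList) := by
  induction codes with
  | nil => intro cs x; simp
  | cons b rest ih =>
    intro cs x
    rw [List.foldl_cons, ih]
    rw [mem_pvAddPrefixes b.toList [] false cs x (by simp)]
    unfold pvGenBy
    simp only [List.mem_cons, List.nil_append]
    constructor
    · rintro ((hx | h) | h)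
      · exact Or.inl hx
      · exact Or.inr ⟨b, Or.inl rfl, h⟩
      · obtain ⟨c, hc, h⟩ := h; exact Or.inr ⟨c, Or.inr hc, h⟩
    · rintro (hx | ⟨c, (rfl | hc), h⟩)
      · exact Or.inl (Or.inl hx)
      · exact Or.inl (Or.inr h)
      · exact Or.inr ⟨c, hc, h⟩

-- ===== VERDICT (by name: the statement is the Claim_ definition above) =====
theorem build_prefix_parents_py_spec : Claim_equal_build_prefix_parents_py := by
  intro all_codes _hdom
  unfold Spec_build_prefix_parents_py build_prefix_parents_py build_prefix_parents_py_alt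
  have hcond : ∀ a : String,
      (all_codes.any (fun b => pvIsPrefixParent a b)) =
      PySem.Set.contains
        (all_codes.foldl (fun cs b => pvAddPrefixes b.toList [] false cs) PySem.Set.empty)
        a.toList := by
    intro a
    rw [Bool.eq_iff_iff, List.any_eq_true, PySem.Set.contains_iff,
      mem_candidates all_codes PySem.Set.empty a.toList]
    constructor
    · rintro ⟨b, hb, h⟩
      exact Or.inr ⟨b, hb, (pvGenBy_iff _ _).mpr ((pvIsPrefixParent_iff a b).mp h)⟩
    · rintro (h | ⟨b, hb, h⟩)
      · simp [PySem.Set.empty] at h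
      · exact ⟨b, hb, (pvIsPrefixParent_iff a b).mpr ((pvGenBy_iff _ _).mp h)⟩
  have hstep : (fun (parents : PySem.Set String) (a : String) =>
      if all_codes.any (fun b => pvIsPrefixParent a b) then PySem.Set.add parents a else parents) =
      (fun (out : PySem.Set String) (a : String) =>
      if PySem.Set.contains
          (all_codes.foldl (fun cs b => pvAddPrefixes b.toList [] false cs) PySem.Set.empty)
          a.toList then PySem.Set.add out a else out) := by
    funext s a
    rw [hcond a]
  rw [hstep]
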